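-- pv_equiv track=rewrite | github.com/gretapapp/Algoritmusok_es_adatszerkezetek_feladatok | 03_Dinamikus_programozasi_feladatok/megoldas.py | bricksGame
-- ===== SOURCE A (Python) =====
-- def bricksGame(arr):
--     n = len(arr)
--     if n == 0:
--         return 0
--     if n == 1:
--         return arr[0]
--     if n == 2:
--         return arr[0] + arr[1]
--     if n == 3:
--         return arr[0] + arr[1] + arr[2]
--
--     max_scores = [0] * n
--     max_scores[n-1] = arr[n-1]
--     max_scores[n-2] = arr[n-2] + arr[n-1]
--     max_scores[n-3] = arr[n-3] + arr[n-2] + arr[n-1]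
--
--     for i in range(n-4, -1, -1):
--         max_scores[i] = max(arr[i] + min(max_scores[i+2], max_scores[i+3], max_scores[i+4] if i+4 < n else 0),
--                             arr[i] + arr[i+1] + min(max_scores[i+3], max_scores[i+4] if i+4 < n else 0, max_scores[i+5] if i+5 < n else 0),
--                             arr[i] + arr[i+1] + arr[i+2] + min(max_scores[i+4] if i+4 < n else 0, max_scores[i+5] if i+5 < n else 0, max_scores[i+6] if i+6 < n else 0))
--
--     return max_scores[0]
-- ===== SOURCE B (Python) =====
-- def bricksGame(arr):
--     # Top-down demand-driven DP: best-score values f(i) are produced lazily by a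
--     # memo dict driven by an explicit stack of pending positions (no DP array,
--     # no special-casing of small n: the forced tail is the recursion's base case).
--     n = len(arr)
--     if n == 0:
--         return 0
--     memo = {}
--     stack = [0]
--     while stack:
--         i = stack[-1]
--         if i in memo:
--             stack.pop()
--         elif i >= n - 3:
--             memo[i] = sum(arr[i:])
--             stack.pop()
--         else:
--             pending = None
--             for j in range(i + 2, min(i + 7, n)):
--                 if j not in memo:
--                     pending = j
--                     break
--             if pending is not None:
--                 stack.append(pending)
--             else:
--                 g = lambda j: memo.get(j, 0)
--                 memo[i] = max(arr[i] + min(g(i + 2), g(i + 3), g(i + 4)),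
--                               arr[i] + arr[i + 1] + min(g(i + 3), g(i + 4), g(i + 5)),
--                               arr[i] + arr[i + 1] + arr[i + 2] +
--                               min(g(i + 4), g(i + 5), g(i + 6)))
--                 stack.pop()
--     return memo[0]
-- ===== Notes on version B (the rewrite author's own statement) =====
-- stated objective: alternative
-- what changed: B replaces A's bottom-up DP over a preallocated array (with four early-return cases and guarded indexing) by a top-down demand-driven evaluation: a memo dict filled lazily by an explicit worklist stack starting from position 0, with the forced 1-3-brick tail as the recursion's base case.
import Mathlib
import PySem

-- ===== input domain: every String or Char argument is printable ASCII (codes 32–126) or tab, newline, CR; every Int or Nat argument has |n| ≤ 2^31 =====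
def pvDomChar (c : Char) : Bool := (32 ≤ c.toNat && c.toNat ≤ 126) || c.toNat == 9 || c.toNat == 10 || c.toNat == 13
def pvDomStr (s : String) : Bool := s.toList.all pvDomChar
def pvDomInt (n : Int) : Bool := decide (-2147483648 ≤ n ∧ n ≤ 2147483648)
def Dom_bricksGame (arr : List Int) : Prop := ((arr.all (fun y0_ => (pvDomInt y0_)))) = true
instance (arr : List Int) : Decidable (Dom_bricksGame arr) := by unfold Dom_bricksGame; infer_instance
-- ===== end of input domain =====

-- B replaces A's bottom-up DP array (with early-return small cases) by a top-down
-- demand-driven evaluation: a memo dict filled lazily by an explicit worklist stack.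

-- ===== PORT A =====
def bricksStepA (arr : List Int) (n : Int) (ms : List Int) (i : Int) : List Int :=
  PySem.List.pySetD ms i
    (max (PySem.List.pyGetD arr i 0 +
            min (PySem.List.pyGetD ms (i+2) 0)
              (min (PySem.List.pyGetD ms (i+3) 0)
                   (if i+4 < n then PySem.List.pyGetD ms (i+4) 0 else 0)))
      (max (PySem.List.pyGetD arr i 0 + PySem.List.pyGetD arr (i+1) 0 +
              min (PySem.List.pyGetD ms (i+3) 0)
                (min (if i+4 < n then PySem.List.pyGetD ms (i+4) 0 else 0)
                     (if i+5 < n then PySem.List.pyGetD ms (i+5) 0 else 0)))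
           (PySem.List.pyGetD arr i 0 + PySem.List.pyGetD arr (i+1) 0 + PySem.List.pyGetD arr (i+2) 0 +
              min (if i+4 < n then PySem.List.pyGetD ms (i+4) 0 else 0)
                (min (if i+5 < n then PySem.List.pyGetD ms (i+5) 0 else 0)
                     (if i+6 < n then PySem.List.pyGetD ms (i+6) 0 else 0)))))

def bricksGame (arr : List Int) : Int :=
  let n : Int := arr.length
  if n = 0 then 0
  else if n = 1 then PySem.List.pyGetD arr 0 0
  else if n = 2 then PySem.List.pyGetD arr 0 0 + PySem.List.pyGetD arr 1 0
  else if n = 3 then PySem.List.pyGetD arr 0 0 + PySem.List.pyGetD arr 1 0 + PySem.List.pyGetD arr 2 0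
  else
    let ms0 : List Int := List.replicate arr.length 0
    let ms1 := PySem.List.pySetD ms0 (n-1) (PySem.List.pyGetD arr (n-1) 0)
    let ms2 := PySem.List.pySetD ms1 (n-2) (PySem.List.pyGetD arr (n-2) 0 + PySem.List.pyGetD arr (n-1) 0)
    let ms3 := PySem.List.pySetD ms2 (n-3) (PySem.List.pyGetD arr (n-3) 0 + PySem.List.pyGetD arr (n-2) 0 + PySem.List.pyGetD arr (n-1) 0)
    let msf := (PySem.List.pyRange (n-4) (-1) (-1)).foldl (bricksStepA arr n) ms3
    PySem.List.pyGetD msf 0 0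

-- ===== PORT B =====
-- memo[i] = max(...) with g = lambda j: memo.get(j, 0)
def bricksVal (arr : List Int) (memo : PySem.Dict Int Int) (i : Int) : Int :=
  max (PySem.List.pyGetD arr i 0 +
         min (memo.getD (i+2) 0) (min (memo.getD (i+3) 0) (memo.getD (i+4) 0)))
    (max (PySem.List.pyGetD arr i 0 + PySem.List.pyGetD arr (i+1) 0 +
            min (memo.getD (i+3) 0) (min (memo.getD (i+4) 0) (memo.getD (i+5) 0)))
         (PySem.List.pyGetD arr i 0 + PySem.List.pyGetD arr (i+1) 0 + PySem.List.pyGetD arr (i+2) 0 +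
            min (memo.getD (i+4) 0) (min (memo.getD (i+5) 0) (memo.getD (i+6) 0))))

-- the 'while stack:' loop; head of the list is the top of the Python stack
-- (stack[-1] / append / pop all act there); fuel only makes the loop total,
-- the proofs below show the chosen fuel is never exhausted
def bricksLoopB (arr : List Int) (n : Int) : Nat → List Int → PySem.Dict Int Int → Option (PySem.Dict Int Int)
  | 0, _, _ => none
  | _+1, [], memo => some memo
  | fuel+1, i :: st, memo =>
    if memo.contains i then
      bricksLoopB arr n fuel st memo
    else if n - 3 ≤ i then
      bricksLoopB arr n fuel st (memo.insert i (PySem.List.slice arr (some i) none).sum)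
    else
      -- first j in range(i+2, min(i+7, n)) with j not in memo
      match (PySem.List.pyRange (i+2) (min (i+7) n) 1).find? (fun j => !(memo.contains j)) with
      | some j => bricksLoopB arr n fuel (j :: i :: st) memo
      | none => bricksLoopB arr n fuel st (memo.insert i (bricksVal arr memo i))

def bricksGame_alt (arr : List Int) : Int :=
  let n : Int := arr.length
  if n = 0 then 0
  else
    match bricksLoopB arr n (3 ^ ((arr.length + 1) * (arr.length + 1)) + 1) [0] PySem.Dict.empty with
    | some memo => memo.getD 0 0
    | none => 0   -- unreachable: the proofs show the fuel suffices

-- ===== PRECONDITION & SPEC =====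
def Spec_bricksGame (arr : List Int) (out : Int) : Prop := out = bricksGame_alt arr
instance (arr : List Int) (out : Int) : Decidable (Spec_bricksGame arr out) := by unfold Spec_bricksGame; infer_instance

-- ===== CLAIM (what is proved, stated in full; the proofs are below) =====
def Claim_equal_bricksGame : Prop := ∀ (arr : List Int), Dom_bricksGame arr → Spec_bricksGame arr (bricksGame arr)

-- ===== LEMMAS AND PROOFS =====

-- Reference recurrence: best score starting at position i (proof-side helper).
def fRef (arr : List Int) (i : Nat) : Int :=
  if arr.length ≤ i then 0
  else if arr.length ≤ i + 3 then (arr.drop i).sum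
  else
    max (arr.getD i 0 + min (fRef arr (i+2)) (min (fRef arr (i+3)) (fRef arr (i+4))))
      (max (arr.getD i 0 + arr.getD (i+1) 0 + min (fRef arr (i+3)) (min (fRef arr (i+4)) (fRef arr (i+5))))
           (arr.getD i 0 + arr.getD (i+1) 0 + arr.getD (i+2) 0 + min (fRef arr (i+4)) (min (fRef arr (i+5)) (fRef arr (i+6)))))
termination_by arr.length - i

theorem fRef_of_ge (arr : List Int) (i : Nat) (h : arr.length ≤ i) : fRef arr i = 0 := by
  rw [fRef]; simp [h]

theorem fRef_base (arr : List Int) (i : Nat) (h1 : i < arr.length) (h2 : arr.length ≤ i + 3) :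
    fRef arr i = (arr.drop i).sum := by
  rw [fRef, if_neg (by omega), if_pos h2]

theorem fRef_rec (arr : List Int) (i : Nat) (h : i + 4 ≤ arr.length) :
    fRef arr i =
      max (arr.getD i 0 + min (fRef arr (i+2)) (min (fRef arr (i+3)) (fRef arr (i+4))))
        (max (arr.getD i 0 + arr.getD (i+1) 0 + min (fRef arr (i+3)) (min (fRef arr (i+4)) (fRef arr (i+5))))
             (arr.getD i 0 + arr.getD (i+1) 0 + arr.getD (i+2) 0 + min (fRef arr (i+4)) (min (fRef arr (i+5)) (fRef arr (i+6))))) := by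
  rw [fRef, if_neg (by omega), if_neg (by omega)]

theorem getD_zero_of_ge (arr : List Int) (m : Nat) (hm : arr.length ≤ m) : arr.getD m 0 = 0 := by
  rw [List.getD_eq_getElem?_getD, List.getElem?_eq_none (by omega)]; rfl

theorem bricks_sum_drop (arr : List Int) (j : Nat) (h : j < arr.length) :
    (arr.drop j).sum = arr.getD j 0 + (arr.drop (j+1)).sum := by
  rw [List.drop_eq_getElem_cons h, List.sum_cons, List.getD_eq_getElem arr 0 h]

theorem drop_sum_of_le (arr : List Int) (m : Nat) (hm : arr.length ≤ m) : (arr.drop m).sum = 0 := by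
  rw [List.drop_eq_nil_of_le hm]; rfl

theorem fRef_base3 (arr : List Int) (i : Nat) (h1 : i < arr.length) (h2 : arr.length ≤ i + 3) :
    fRef arr i = arr.getD i 0 + arr.getD (i+1) 0 + arr.getD (i+2) 0 := by
  rw [fRef_base arr i h1 h2, bricks_sum_drop arr i h1]
  rcases Nat.lt_or_ge (i+1) arr.length with hb | hb
  · rw [bricks_sum_drop arr (i+1) hb]
    rcases Nat.lt_or_ge (i+2) arr.length with hc | hc
    · rw [bricks_sum_drop arr (i+2) hc, drop_sum_of_le arr (i+2+1) (by omega)]; ring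
    · rw [drop_sum_of_le arr (i+1+1) (by omega), getD_zero_of_ge arr (i+2) hc]; ring
  · rw [drop_sum_of_le arr (i+1) hb, getD_zero_of_ge arr (i+1) hb, getD_zero_of_ge arr (i+2) (by omega)]; ring

-- ===== A-side invariant =====

theorem stepA_inv (arr ms : List Int) (j : Nat)
    (hlen : ms.length = arr.length) (hj4 : j + 4 ≤ arr.length)
    (hinv : ∀ k : Nat, j < k → PySem.List.pyGetD ms (k:Int) 0 = fRef arr k) :
    (bricksStepA arr arr.length ms (j:Int)).length = arr.length ∧
    ∀ k : Nat, j ≤ k → PySem.List.pyGetD (bricksStepA arr arr.length ms (j:Int)) (k:Int) 0 = fRef arr k := by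
  have hguard : ∀ m : Nat, j < m →
      (if (m:Int) < (arr.length:Int) then PySem.List.pyGetD ms (m:Int) 0 else 0) = fRef arr m := by
    intro m hm
    split
    · exact hinv m hm
    · exact (fRef_of_ge arr m (by omega)).symm
  have e1 : ((j:Int)+1) = ((j+1 : Nat) : Int) := by push_cast; ring
  have e2 : ((j:Int)+2) = ((j+2 : Nat) : Int) := by push_cast; ring
  have e3 : ((j:Int)+3) = ((j+3 : Nat) : Int) := by push_cast; ring
  have e4 : ((j:Int)+4) = ((j+4 : Nat) : Int) := by push_cast; ring
  have e5 : ((j:Int)+5) = ((j+5 : Nat) : Int) := by push_cast; ring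
  have e6 : ((j:Int)+6) = ((j+6 : Nat) : Int) := by push_cast; ring
  simp only [bricksStepA]
  constructor
  · rw [PySem.List.length_pySetD, hlen]
  · intro k hk
    rw [e1, e2, e3, e4, e5, e6,
        PySem.List.pyGetD_pySetD_natCast _ _ _ _ _ (by omega)]
    by_cases hkj : k = j
    · rw [if_pos hkj, hkj,
          hguard (j+4) (by omega), hguard (j+5) (by omega), hguard (j+6) (by omega),
          hinv (j+2) (by omega), hinv (j+3) (by omega),
          PySem.List.pyGetD_natCast, PySem.List.pyGetD_natCast, PySem.List.pyGetD_natCast,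
          fRef_rec arr j (by omega)]
    · rw [if_neg hkj]
      exact hinv k (by omega)

theorem loopA (arr : List Int) (j : Nat) : ∀ (ms : List Int),
    j + 4 ≤ arr.length → ms.length = arr.length →
    (∀ k : Nat, j < k → PySem.List.pyGetD ms (k:Int) 0 = fRef arr k) →
    ∀ k : Nat,
      PySem.List.pyGetD ((PySem.List.pyRange (j:Int) (-1) (-1)).foldl (bricksStepA arr arr.length) ms) (k:Int) 0
        = fRef arr k := by
  induction j with
  | zero =>
    intro ms h4 hlen hinv k
    rw [PySem.List.pyRange_neg_one_cons (by omega), show ((0:Nat):Int) - 1 = -1 by norm_num,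
        PySem.List.pyRange_neg_one_eq_nil le_rfl]
    simp only [List.foldl_cons, List.foldl_nil]
    exact (stepA_inv arr ms 0 hlen h4 hinv).2 k (by omega)
  | succ j ih =>
    intro ms h4 hlen hinv k
    rw [PySem.List.pyRange_neg_one_cons (by omega),
        show (((j+1:Nat)):Int) - 1 = ((j:Nat):Int) by push_cast; ring]
    simp only [List.foldl_cons]
    obtain ⟨hl2, hi2⟩ := stepA_inv arr ms (j+1) hlen h4 hinv
    exact ih _ (by omega) hl2 (fun m hm => hi2 m (by omega)) k

theorem baseA (arr : List Int) (h4 : 4 ≤ arr.length) :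
    ∀ k : Nat, arr.length - 4 < k →
    PySem.List.pyGetD
      (PySem.List.pySetD
        (PySem.List.pySetD
          (PySem.List.pySetD (List.replicate arr.length (0:Int)) ((arr.length:Int)-1)
            (PySem.List.pyGetD arr ((arr.length:Int)-1) 0))
          ((arr.length:Int)-2)
          (PySem.List.pyGetD arr ((arr.length:Int)-2) 0 + PySem.List.pyGetD arr ((arr.length:Int)-1) 0))
        ((arr.length:Int)-3)
        (PySem.List.pyGetD arr ((arr.length:Int)-3) 0 + PySem.List.pyGetD arr ((arr.length:Int)-2) 0 +
          PySem.List.pyGetD arr ((arr.length:Int)-1) 0))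
      (k:Int) 0 = fRef arr k := by
  intro k hk
  have e1 : ((arr.length:Int)-1) = ((arr.length-1 : Nat):Int) := by omega
  have e2 : ((arr.length:Int)-2) = ((arr.length-2 : Nat):Int) := by omega
  have e3 : ((arr.length:Int)-3) = ((arr.length-3 : Nat):Int) := by omega
  rw [e1, e2, e3,
      PySem.List.pyGetD_pySetD_natCast _ _ _ _ _
        (by simp only [PySem.List.length_pySetD, List.length_replicate]; omega)]
  by_cases hk3 : k = arr.length - 3
  · rw [if_pos hk3, hk3, fRef_base3 arr _ (by omega) (by omega)]
    simp only [PySem.List.pyGetD_natCast]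
    rw [show arr.length - 3 + 1 = arr.length - 2 by omega,
        show arr.length - 3 + 2 = arr.length - 1 by omega]
  · rw [if_neg hk3,
        PySem.List.pyGetD_pySetD_natCast _ _ _ _ _
          (by simp only [PySem.List.length_pySetD, List.length_replicate]; omega)]
    by_cases hk2 : k = arr.length - 2
    · rw [if_pos hk2, hk2, fRef_base3 arr _ (by omega) (by omega)]
      simp only [PySem.List.pyGetD_natCast]
      rw [show arr.length - 2 + 1 = arr.length - 1 by omega,
          getD_zero_of_ge arr (arr.length - 2 + 2) (by omega)]
      ring
    · rw [if_neg hk2,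
          PySem.List.pyGetD_pySetD_natCast _ _ _ _ _ (by simp only [List.length_replicate]; omega)]
      by_cases hk1 : k = arr.length - 1
      · rw [if_pos hk1, hk1, fRef_base3 arr _ (by omega) (by omega)]
        simp only [PySem.List.pyGetD_natCast]
        rw [getD_zero_of_ge arr (arr.length - 1 + 1) (by omega),
            getD_zero_of_ge arr (arr.length - 1 + 2) (by omega)]
        ring
      · rw [if_neg hk1, PySem.List.pyGetD_natCast, fRef_of_ge arr k (by omega)]
        simp [List.getD]

theorem bricksGame_eq_fRef (arr : List Int) : bricksGame arr = fRef arr 0 := by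
  simp only [bricksGame]
  by_cases h0 : arr.length = 0
  · rw [if_pos (by omega), fRef_of_ge arr 0 (by omega)]
  by_cases h1 : arr.length = 1
  · rw [if_neg (by omega), if_pos (by omega), fRef_base3 arr 0 (by omega) (by omega),
        PySem.List.pyGetD_ofNat',
        getD_zero_of_ge arr (0+1) (by omega), getD_zero_of_ge arr (0+2) (by omega)]
    ring
  by_cases h2 : arr.length = 2
  · rw [if_neg (by omega), if_neg (by omega), if_pos (by omega), fRef_base3 arr 0 (by omega) (by omega),
        PySem.List.pyGetD_ofNat', PySem.List.pyGetD_ofNat',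
        getD_zero_of_ge arr (0+2) (by omega)]
    ring
  by_cases h3 : arr.length = 3
  · rw [if_neg (by omega), if_neg (by omega), if_neg (by omega), if_pos (by omega),
        fRef_base3 arr 0 (by omega) (by omega),
        PySem.List.pyGetD_ofNat', PySem.List.pyGetD_ofNat', PySem.List.pyGetD_ofNat']
  · rw [if_neg (by omega), if_neg (by omega), if_neg (by omega), if_neg (by omega),
        show ((arr.length:Int) - 4) = ((arr.length - 4 : Nat):Int) by omega]
    have H := loopA arr (arr.length - 4) _ (by omega)
      (by simp only [PySem.List.length_pySetD, List.length_replicate])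
      (baseA arr (by omega)) 0
    simpa using H

-- ===== B-side proof =====

-- memo invariant: every stored value is the fRef value of an in-range position
def BInv (arr : List Int) (memo : PySem.Dict Int Int) : Prop :=
  ∀ (j v : Int), memo.get? j = some v → 0 ≤ j ∧ j < (arr.length : Int) ∧ v = fRef arr j.toNat

-- unmemoized in-range positions (second component of the termination measure)
def BU (arr : List Int) (memo : PySem.Dict Int Int) : Finset Nat :=
  (Finset.range arr.length).filter (fun j => memo.get? (j:Int) = none)

def Bμ (arr : List Int) (i : Int) (memo : PySem.Dict Int Int) : Nat :=
  (arr.length - i.toNat) * (arr.length + 1) + (BU arr memo).card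

theorem BInv_getD (arr : List Int) (memo : PySem.Dict Int Int) (hinv : BInv arr memo)
    (j : Int) (h0 : 0 ≤ j)
    (hc : memo.contains j = true ∨ (arr.length : Int) ≤ j) :
    memo.getD j 0 = fRef arr j.toNat := by
  cases hg : memo.get? j with
  | some v =>
    rw [PySem.Dict.getD_eq_get?_getD, hg, Option.getD_some]
    exact (hinv j v hg).2.2
  | none =>
    rw [PySem.Dict.getD_eq_get?_getD, hg, Option.getD_none]
    rcases hc with hc | hc
    · rw [PySem.Dict.contains_eq_isSome_get?, hg] at hc; simp at hc
    · rw [fRef_of_ge arr j.toNat (by omega)]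

theorem loopB_nil (arr : List Int) (n : Int) (f : Nat) (memo : PySem.Dict Int Int) :
    bricksLoopB arr n (f+1) [] memo = some memo := rfl

theorem loopB_step_memo (arr : List Int) (n : Int) (f : Nat) (i : Int) (st : List Int)
    (memo : PySem.Dict Int Int) (h : memo.contains i = true) :
    bricksLoopB arr n (f+1) (i :: st) memo = bricksLoopB arr n f st memo := by
  rw [bricksLoopB, if_pos h]

theorem loopB_step_base (arr : List Int) (n : Int) (f : Nat) (i : Int) (st : List Int)
    (memo : PySem.Dict Int Int) (h : memo.contains i = false) (h2 : n - 3 ≤ i) :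
    bricksLoopB arr n (f+1) (i :: st) memo =
      bricksLoopB arr n f st (memo.insert i (PySem.List.slice arr (some i) none).sum) := by
  rw [bricksLoopB, if_neg (by simp [h]), if_pos h2]

theorem loopB_step_push (arr : List Int) (n : Int) (f : Nat) (i j : Int) (st : List Int)
    (memo : PySem.Dict Int Int) (h : memo.contains i = false) (h2 : ¬ (n - 3 ≤ i))
    (h3 : (PySem.List.pyRange (i+2) (min (i+7) n) 1).find? (fun j => !(memo.contains j)) = some j) :
    bricksLoopB arr n (f+1) (i :: st) memo = bricksLoopB arr n f (j :: i :: st) memo := by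
  rw [bricksLoopB, if_neg (by simp [h]), if_neg h2, h3]

theorem loopB_step_compute (arr : List Int) (n : Int) (f : Nat) (i : Int) (st : List Int)
    (memo : PySem.Dict Int Int) (h : memo.contains i = false) (h2 : ¬ (n - 3 ≤ i))
    (h3 : (PySem.List.pyRange (i+2) (min (i+7) n) 1).find? (fun j => !(memo.contains j)) = none) :
    bricksLoopB arr n (f+1) (i :: st) memo =
      bricksLoopB arr n f st (memo.insert i (bricksVal arr memo i)) := by
  rw [bricksLoopB, if_neg (by simp [h]), if_neg h2, h3]

theorem get?_eq_none_of_contains_false (memo : PySem.Dict Int Int) (i : Int)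
    (h : memo.contains i = false) : memo.get? i = none := by
  rw [PySem.Dict.contains_eq_isSome_get?] at h
  cases hg : memo.get? i with
  | none => rfl
  | some v => rw [hg] at h; simp at h

theorem frameB (arr : List Int) : ∀ (m : Nat), ∀ (i : Int) (memo : PySem.Dict Int Int),
    Bμ arr i memo ≤ m → BInv arr memo → 0 ≤ i → i < (arr.length : Int) →
    ∃ (k : Nat) (memo' : PySem.Dict Int Int),
      k ≤ 3 ^ m ∧ BInv arr memo' ∧
      (∀ j v, memo.get? j = some v → memo'.get? j = some v) ∧
      (memo'.get? i).isSome ∧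
      ∀ (f : Nat) (st : List Int),
        bricksLoopB arr (arr.length : Int) (f + k) (i :: st) memo =
        bricksLoopB arr (arr.length : Int) f st memo' := by
  intro m
  induction m using Nat.strong_induction_on with
  | _ m IH =>
  intro i memo hμ hinv h0 hi
  have hone : 1 ≤ 3 ^ m := Nat.one_le_pow m 3 (by norm_num)
  by_cases hc : memo.contains i = true
  · -- already memoized: pop
    refine ⟨1, memo, hone, hinv, fun j v h => h, ?_, ?_⟩
    · rw [← PySem.Dict.contains_eq_isSome_get?]; exact hc
    · intro f st; exact loopB_step_memo arr _ f i st memo hc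
  · have hcf : memo.contains i = false := by simpa using hc
    have hnone : memo.get? i = none := get?_eq_none_of_contains_false memo i hcf
    by_cases h3 : (arr.length : Int) - 3 ≤ i
    · -- base case: memo[i] = sum(arr[i:])
      refine ⟨1, memo.insert i (PySem.List.slice arr (some i) none).sum, hone, ?_, ?_, ?_, ?_⟩
      · intro j v hj
        rw [PySem.Dict.get?_insert] at hj
        split at hj
        · rename_i hji
          subst hji
          refine ⟨h0, hi, ?_⟩
          have := Option.some.inj hj
          rw [← this, PySem.List.slice_from _ h0, fRef_base arr j.toNat (by omega) (by omega)]
        · exact hinv j v hj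
      · intro j v hj
        rw [PySem.Dict.get?_insert]
        split
        · rename_i hji; rw [hji, hnone] at hj; cases hj
        · exact hj
      · rw [PySem.Dict.get?_insert_self]; rfl
      · intro f st; exact loopB_step_base arr _ f i st memo hcf h3
    · cases hfind : (PySem.List.pyRange (i+2) (min (i+7) (arr.length:Int)) 1).find?
          (fun j => !(memo.contains j)) with
      | some j =>
        -- push the first missing dependency and recurse
        have hmem := List.mem_of_find?_eq_some hfind
        have hpred : memo.contains j = false := by
          have := List.find?_some hfind; simpa using this
        rw [PySem.List.mem_pyRange_one] at hmem
        obtain ⟨hj1, hj2⟩ := hmem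
        have hj2' : j < (arr.length : Int) := lt_of_lt_of_le hj2 (min_le_right _ _)
        have hjnone : memo.get? j = none := get?_eq_none_of_contains_false memo j hpred
        have hm1 : 1 ≤ m := by
          have : 1 ≤ Bμ arr i memo := by
            unfold Bμ
            have : 1 ≤ (arr.length - i.toNat) * (arr.length + 1) :=
              Nat.one_le_iff_ne_zero.mpr (by
                have h1 : 1 ≤ arr.length - i.toNat := by omega
                have h2 : 1 ≤ arr.length + 1 := by omega
                exact Nat.mul_ne_zero (by omega) (by omega))
            omega
          omega
        -- measure of the pushed frame
        have hμj : Bμ arr j memo ≤ m - 1 := by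
          have hstep : (arr.length - j.toNat) * (arr.length + 1) + (arr.length + 1)
              ≤ (arr.length - i.toNat) * (arr.length + 1) := by
            have hle : (arr.length - j.toNat) + 1 ≤ arr.length - i.toNat := by omega
            calc (arr.length - j.toNat) * (arr.length + 1) + (arr.length + 1)
                = ((arr.length - j.toNat) + 1) * (arr.length + 1) := by ring
              _ ≤ (arr.length - i.toNat) * (arr.length + 1) :=
                  Nat.mul_le_mul_right _ hle
          unfold Bμ at hμ ⊢
          generalize hA : (arr.length - j.toNat) * (arr.length + 1) = A at hstep
          generalize hB : (arr.length - i.toNat) * (arr.length + 1) = B at hstep hμ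
          omega
        obtain ⟨kj, memoj, hkj, hinvj, hsubj, hsomej, hrunj⟩ :=
          IH (m-1) (by omega) j memo hμj hinv (by omega) hj2'
        -- after resolving j the measure of i's frame dropped
        have hcard : (BU arr memoj).card < (BU arr memo).card := by
          apply Finset.card_lt_card
          rw [Finset.ssubset_iff_of_subset]
          · refine ⟨j.toNat, ?_, ?_⟩
            · simp only [BU, Finset.mem_filter, Finset.mem_range]
              refine ⟨by omega, ?_⟩
              rw [Int.toNat_of_nonneg (by omega)]
              exact hjnone
            · simp only [BU, Finset.mem_filter, Finset.mem_range]
              rw [Int.toNat_of_nonneg (by omega)]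
              intro ⟨_, hn⟩
              rw [hn] at hsomej; cases hsomej
          · intro x hx
            simp only [BU, Finset.mem_filter, Finset.mem_range] at hx ⊢
            refine ⟨hx.1, ?_⟩
            cases hg : memo.get? (x:Int) with
            | none => rfl
            | some v => rw [hsubj _ _ hg] at hx; cases hx.2
        have hμi : Bμ arr i memoj ≤ m - 1 := by
          unfold Bμ at hμ ⊢
          generalize hB : (arr.length - i.toNat) * (arr.length + 1) = B at hμ ⊢
          omega
        obtain ⟨ki, memoi, hki, hinvi, hsubi, hsomei, hruni⟩ :=
          IH (m-1) (by omega) i memoj hμi hinvj h0 hi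
        refine ⟨kj + ki + 1, memoi, ?_, hinvi, ?_, hsomei, ?_⟩
        · have h3m : 3 ^ m = 3 ^ (m-1) * 3 := by
            rw [← pow_succ]; congr 1; omega
          omega
        · intro a v ha; exact hsubi a v (hsubj a v ha)
        · intro f st
          have e : f + (kj + ki + 1) = ((f + ki) + kj) + 1 := by omega
          rw [e, loopB_step_push arr _ _ i j st memo hcf h3 hfind,
              hrunj (f + ki) (i :: st), hruni f st]
      | none =>
        -- all dependencies memoized: compute memo[i]
        have hall : ∀ x ∈ PySem.List.pyRange (i+2) (min (i+7) (arr.length:Int)) 1,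
            memo.contains x = true := by
          intro x hx
          have := List.find?_eq_none.mp hfind x hx
          simpa using this
        have hdep : ∀ t : Int, 2 ≤ t → t < 7 → memo.getD (i+t) 0 = fRef arr (i+t).toNat := by
          intro t h2 h7
          apply BInv_getD arr memo hinv (i+t) (by omega)
          by_cases hl : i + t < (arr.length : Int)
          · left
            apply hall
            rw [PySem.List.mem_pyRange_one]
            exact ⟨by omega, lt_min (by omega) hl⟩
          · right; omega
        have hval : bricksVal arr memo i = fRef arr i.toNat := by
          unfold bricksVal
          rw [hdep 2 (by norm_num) (by norm_num), hdep 3 (by norm_num) (by norm_num),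
              hdep 4 (by norm_num) (by norm_num), hdep 5 (by norm_num) (by norm_num),
              hdep 6 (by norm_num) (by norm_num),
              PySem.List.pyGetD_of_nonneg _ _ h0,
              PySem.List.pyGetD_of_nonneg _ _ (by omega : (0:Int) ≤ i + 1),
              PySem.List.pyGetD_of_nonneg _ _ (by omega : (0:Int) ≤ i + 2),
              show (i+1).toNat = i.toNat + 1 by omega,
              show (i+2).toNat = i.toNat + 2 by omega,
              show (i+3).toNat = i.toNat + 3 by omega,
              show (i+4).toNat = i.toNat + 4 by omega,
              show (i+5).toNat = i.toNat + 5 by omega,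
              show (i+6).toNat = i.toNat + 6 by omega]
          exact (fRef_rec arr i.toNat (by omega)).symm
        refine ⟨1, memo.insert i (bricksVal arr memo i), hone, ?_, ?_, ?_, ?_⟩
        · intro j v hj
          rw [PySem.Dict.get?_insert] at hj
          split at hj
          · rename_i hji
            subst hji
            exact ⟨h0, hi, by rw [← Option.some.inj hj, hval]⟩
          · exact hinv j v hj
        · intro j v hj
          rw [PySem.Dict.get?_insert]
          split
          · rename_i hji; rw [hji, hnone] at hj; cases hj
          · exact hj
        · rw [PySem.Dict.get?_insert_self]; rfl
        · intro f st; exact loopB_step_compute arr _ f i st memo hcf h3 hfind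

theorem bricksGame_alt_eq_fRef (arr : List Int) : bricksGame_alt arr = fRef arr 0 := by
  simp only [bricksGame_alt]
  by_cases h0 : (arr.length : Int) = 0
  · rw [if_pos h0, fRef_of_ge arr 0 (by omega)]
  · rw [if_neg h0]
    have hBU : (BU arr PySem.Dict.empty).card = arr.length := by
      simp [BU, PySem.Dict.get?_empty]
    have hμ : Bμ arr 0 PySem.Dict.empty ≤ (arr.length + 1) * (arr.length + 1) := by
      unfold Bμ
      rw [hBU]
      have e : (arr.length + 1) * (arr.length + 1)
          = arr.length * (arr.length + 1) + (arr.length + 1) := by ring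
      rw [e, show ((0:Int)).toNat = 0 from rfl, Nat.sub_zero]
      generalize arr.length * (arr.length + 1) = P
      omega
    have hinv0 : BInv arr PySem.Dict.empty := by
      intro j v hj
      rw [PySem.Dict.get?_empty] at hj; cases hj
    obtain ⟨k, memo', hk, hinv', hsub, hsome, hrun⟩ :=
      frameB arr ((arr.length + 1) * (arr.length + 1)) 0 PySem.Dict.empty hμ hinv0 le_rfl
        (by omega)
    have e1 : 3 ^ ((arr.length + 1) * (arr.length + 1)) + 1
        = (3 ^ ((arr.length + 1) * (arr.length + 1)) + 1 - k) + k := by omega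
    rw [e1, hrun _ [],
        show 3 ^ ((arr.length + 1) * (arr.length + 1)) + 1 - k
          = (3 ^ ((arr.length + 1) * (arr.length + 1)) - k) + 1 by omega,
        loopB_nil]
    obtain ⟨v, hv⟩ := Option.isSome_iff_exists.mp hsome
    have hval := (hinv' 0 v hv).2.2
    show memo'.getD 0 0 = fRef arr 0
    rw [PySem.Dict.getD_eq_get?_getD, hv, Option.getD_some, hval]
    rfl

-- ===== VERDICT (by name: the statement is the Claim_ definition above) =====
theorem bricksGame_spec : Claim_equal_bricksGame := by
  intro arr _
  unfold Spec_bricksGame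
  rw [bricksGame_alt_eq_fRef, bricksGame_eq_fRef]
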